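-- pv_equiv track=rewrite | github.com/lukasrynt/Bachelor-thesis | implementace/word2vec/helpers/corpus_creation.py | interleave_words
-- ===== SOURCE A (Python) =====
-- def interleave_words(sent1: list[str], sent2: list[str]) -> list[list]:
--     """
--     Method for sequential interleaving of two sentences
--     :param sent1: List of tokens in the first sentence
--     :param sent2: List of tokens in the second sentence
--     :return: List of interleaved sentences
--     """
--     if len(sent1) > len(sent2):
--         long = sent1
--         short = sent2
--     else:
--         long = sent2
--         short = sent1
--
--     res = []
--     times = len(long) - len(short)
--     if times == 0:
--         times = 1
--     for start_pos in range(times):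
--         sent = []
--         for i, token in enumerate(long):
--             sent.append(token)
--             if (i < len(short) + start_pos) and i >= start_pos:
--                 sent.append(short[i - start_pos])
--         res.append(sent)
--     return res
-- ===== SOURCE B (Python) =====
-- def interleave_words(sent1: list[str], sent2: list[str]) -> list[list]:
--     """Same result as A, built back-to-front: for each start position (walked in
--     reverse) the sentence is three concatenated pieces - prefix slice, the
--     zip-weave of the tail with the short sentence, suffix slice - prepended to
--     the result."""
--     if len(sent1) <= len(sent2):
--         short, long = sent1, sent2
--     else:
--         short, long = sent2, sent1
--     times = max(len(long) - len(short), 1)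
--     res = []
--     for k in range(times - 1, -1, -1):
--         weave = [t for pair in zip(long[k:], short) for t in pair]
--         res.insert(0, long[:k] + weave + long[k + len(short):])
--     return res
-- ===== Notes on version B (the rewrite author's own statement) =====
-- stated objective: alternative
-- what changed: Replaces A's per-token loop testing whether each index lies in the insertion window by assembling each sentence from three concatenated pieces (prefix slice, zip-weave of the tail with the short sentence, suffix slice), and builds the result list back-to-front by prepending while walking the start positions in reverse.
import Mathlib
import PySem

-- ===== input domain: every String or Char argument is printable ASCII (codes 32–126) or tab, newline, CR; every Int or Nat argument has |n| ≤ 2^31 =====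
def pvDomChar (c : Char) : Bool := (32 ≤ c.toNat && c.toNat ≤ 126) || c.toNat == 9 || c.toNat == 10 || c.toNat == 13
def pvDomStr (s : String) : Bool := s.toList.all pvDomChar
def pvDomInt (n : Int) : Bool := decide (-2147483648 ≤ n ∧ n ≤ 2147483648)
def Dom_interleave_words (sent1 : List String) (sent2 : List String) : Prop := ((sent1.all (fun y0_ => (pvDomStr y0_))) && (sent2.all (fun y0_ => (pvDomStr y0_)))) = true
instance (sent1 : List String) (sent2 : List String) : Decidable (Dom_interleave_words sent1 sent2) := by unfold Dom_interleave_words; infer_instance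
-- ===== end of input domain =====

-- B builds the result back-to-front: for each start position, walked in reverse, the sentence
-- is three concatenated pieces (prefix slice, zip-weave of the tail with the short sentence,
-- suffix slice) prepended to the accumulator; alternative decomposition, same cost.

-- ===== PORT A =====
-- literal transliteration of A; short[i - start_pos] is always in range (the if-condition
-- guards it), so the .getD "" default of pyGet? is never used
def interleave_words (sent1 : List String) (sent2 : List String) : List (List String) :=
  let p := if sent1.length > sent2.length then (sent1, sent2) else (sent2, sent1)
  let lng := p.1
  let shrt := p.2
  let times0 : Int := (lng.length : Int) - (shrt.length : Int)
  let times : Int := if times0 = 0 then 1 else times0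
  (PySem.List.pyRange 0 times 1).foldl (fun res start_pos =>
    res ++ [(PySem.List.enumerate lng 0).foldl (fun sent it =>
      if it.1 < (shrt.length : Int) + start_pos ∧ start_pos ≤ it.1 then
        (sent ++ [it.2]) ++ [(PySem.List.pyGet? shrt (it.1 - start_pos)).getD ""]
      else sent ++ [it.2]) ([] : List String)]) []

-- ===== PORT B =====
def interleave_words_alt (sent1 : List String) (sent2 : List String) : List (List String) :=
  let sel := if sent1.length ≤ sent2.length then (sent1, sent2) else (sent2, sent1)
  let shrt := sel.1
  let lng := sel.2
  let times : Nat := max (lng.length - shrt.length) 1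
  (PySem.List.pyRange ((times : Int) - 1) (-1) (-1)).foldl (fun res k =>
    (PySem.List.slice lng none (some k)
      ++ ((PySem.List.slice lng (some k) none).zip shrt).flatMap (fun pair => [pair.1, pair.2])
      ++ PySem.List.slice lng (some (k + (shrt.length : Int))) none) :: res) []

-- ===== PRECONDITION & SPEC =====
def Spec_interleave_words (sent1 : List String) (sent2 : List String) (out : List (List String)) : Prop := out = interleave_words_alt sent1 sent2
instance (sent1 : List String) (sent2 : List String) (out : List (List String)) : Decidable (Spec_interleave_words sent1 sent2 out) := by unfold Spec_interleave_words; infer_instance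

-- ===== CLAIM (what is proved, stated in full; the proofs are below) =====
def Claim_equal_interleave_words : Prop := ∀ (sent1 : List String) (sent2 : List String), Dom_interleave_words sent1 sent2 → Spec_interleave_words sent1 sent2 (interleave_words sent1 sent2)

-- ===== LEMMAS AND PROOFS =====

-- A's inner per-start_pos loop, named for the proofs
def pvAInner (L S : List String) (sp : Int) : List String :=
  (PySem.List.enumerate L 0).foldl (fun sent it =>
    if it.1 < (S.length : Int) + sp ∧ sp ≤ it.1 then
      (sent ++ [it.2]) ++ [(PySem.List.pyGet? S (it.1 - sp)).getD ""]
    else sent ++ [it.2]) ([] : List String)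

theorem pv_flatMap_congr {α β : Type} {l : List α} {f g : α → List β}
    (h : ∀ x ∈ l, f x = g x) : l.flatMap f = l.flatMap g := by
  induction l with
  | nil => rfl
  | cons a l ih =>
    simp only [List.flatMap_cons]
    rw [h a (by simp), ih (fun x hx => h x (by simp [hx]))]

theorem pv_flatMap_snd {α β : Type} (l : List (α × β)) :
    l.flatMap (fun p => [p.2]) = l.map (·.2) := by
  induction l with
  | nil => rfl
  | cons a l ih => simp [List.flatMap_cons, ih]

-- the zipped middle window: enumerate-indexed lookups into the short sentence
-- are exactly the zip interleave
theorem pv_mid (W S : List String) (s : Int) (hlen : W.length = S.length) :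
    (PySem.List.enumerate W s).flatMap
        (fun it => [it.2, (PySem.List.pyGet? S (it.1 - s)).getD ""])
      = (W.zip S).flatMap (fun q => [q.1, q.2]) := by
  induction W generalizing S s with
  | nil =>
    cases S with
    | nil => rfl
    | cons b S => simp at hlen
  | cons w W ih =>
    cases S with
    | nil => simp at hlen
    | cons b S =>
      have hlen' : W.length = S.length := by simpa using hlen
      rw [PySem.List.enumerate_cons, List.zip_cons_cons, List.flatMap_cons, List.flatMap_cons]
      have h0 : s - s = ((0 : Nat) : Int) := by simp
      have hcg : (PySem.List.enumerate W (s + 1)).flatMap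
            (fun it => [it.2, (PySem.List.pyGet? (b :: S) (it.1 - s)).getD ""])
          = (PySem.List.enumerate W (s + 1)).flatMap
            (fun it => [it.2, (PySem.List.pyGet? S (it.1 - (s + 1))).getD ""]) := by
        apply pv_flatMap_congr
        intro x hx
        rcases (PySem.List.mem_enumerate_iff _ _ _).1 hx with ⟨k, hk, rfl⟩
        have e1 : (s + 1 + (k : Int)) - s = (((k + 1 : Nat) : Int)) := by omega
        have e2 : (s + 1 + (k : Int)) - (s + 1) = ((k : Nat) : Int) := by omega
        rw [e1, e2, PySem.List.pyGet?_natCast, PySem.List.pyGet?_natCast]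
        simp
      rw [h0, PySem.List.pyGet?_natCast, hcg, ih S (s + 1) hlen']
      simp

-- per-start_pos equality: A's conditional per-token fold in take/weave/drop form
theorem pv_inner (L S : List String) (sp : Int) (h0 : 0 ≤ sp)
    (h1 : sp.toNat + S.length ≤ L.length) :
    pvAInner L S sp
      = L.take sp.toNat
        ++ (((L.drop sp.toNat).take S.length).zip S).flatMap (fun q => [q.1, q.2])
        ++ L.drop (sp.toNat + S.length) := by
  set n := sp.toNat with hn
  unfold pvAInner
  have hfold : (PySem.List.enumerate L 0).foldl (fun sent it =>
        if it.1 < (S.length : Int) + sp ∧ sp ≤ it.1 then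
          (sent ++ [it.2]) ++ [(PySem.List.pyGet? S (it.1 - sp)).getD ""]
        else sent ++ [it.2]) ([] : List String)
      = (PySem.List.enumerate L 0).flatMap (fun it =>
          if it.1 < (S.length : Int) + sp ∧ sp ≤ it.1 then
            [it.2, (PySem.List.pyGet? S (it.1 - sp)).getD ""] else [it.2]) := by
    rw [PySem.List.foldl_congr_mem _ _
        (fun sent it => sent ++ (if it.1 < (S.length : Int) + sp ∧ sp ≤ it.1 then
          [it.2, (PySem.List.pyGet? S (it.1 - sp)).getD ""] else [it.2])) _
        (by
          intro acc x _
          by_cases h : x.1 < (S.length : Int) + sp ∧ sp ≤ x.1 <;> simp [h]),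
      PySem.List.foldl_append_eq_flatMap, List.nil_append]
  rw [hfold]
  set T := L.take n with hT
  set W := (L.drop n).take S.length with hW
  set R := L.drop (n + S.length) with hR
  have hTlen : T.length = n := by
    rw [hT]; exact List.length_take_of_le (by omega)
  have hWlen : W.length = S.length := by
    rw [hW]; exact List.length_take_of_le (by rw [List.length_drop]; omega)
  have hWR : W ++ R = L.drop n := by
    rw [hW, hR]
    have : L.drop (n + S.length) = ((L.drop n).drop S.length) := by
      rw [List.drop_drop]
    rw [this, List.take_append_drop]
  have hLsplit : L = T ++ (W ++ R) := by
    rw [hT, hWR, List.take_append_drop]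
  conv_lhs => rw [hLsplit]
  rw [PySem.List.enumerate_append, PySem.List.enumerate_append,
    List.flatMap_append, List.flatMap_append]
  -- prefix: the condition is false (index < sp)
  have hTpart : (PySem.List.enumerate T 0).flatMap (fun it =>
      if it.1 < (S.length : Int) + sp ∧ sp ≤ it.1 then
        [it.2, (PySem.List.pyGet? S (it.1 - sp)).getD ""] else [it.2]) = T := by
    rw [pv_flatMap_congr (g := fun it => [it.2]) ?_, pv_flatMap_snd,
      PySem.List.map_snd_enumerate]
    intro x hx
    rcases (PySem.List.mem_enumerate_iff _ _ _).1 hx with ⟨k, hk, rfl⟩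
    rw [hTlen] at hk
    have hc : ¬ ((0 : Int) + (k : Int) < (S.length : Int) + sp ∧ sp ≤ (0 : Int) + (k : Int)) := by
      omega
    rw [if_neg hc]
  -- window: the condition is true, apply pv_mid
  have hWpart : (PySem.List.enumerate W ((0 : Int) + (T.length : Int))).flatMap (fun it =>
      if it.1 < (S.length : Int) + sp ∧ sp ≤ it.1 then
        [it.2, (PySem.List.pyGet? S (it.1 - sp)).getD ""] else [it.2])
      = (W.zip S).flatMap (fun q => [q.1, q.2]) := by
    rw [pv_flatMap_congr
        (g := fun it => [it.2, (PySem.List.pyGet? S (it.1 - sp)).getD ""]) ?_]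
    · have e : ((0 : Int) + (T.length : Int)) = sp := by rw [hTlen]; omega
      rw [e, pv_mid W S sp hWlen]
    · intro x hx
      rcases (PySem.List.mem_enumerate_iff _ _ _).1 hx with ⟨k, hk, rfl⟩
      rw [hWlen] at hk
      have hc : (0 : Int) + (T.length : Int) + (k : Int) < (S.length : Int) + sp ∧
          sp ≤ (0 : Int) + (T.length : Int) + (k : Int) := by
        rw [hTlen]; constructor <;> omega
      rw [if_pos hc]
  -- suffix: the condition is false (index ≥ sp + |S|)
  have hRpart : (PySem.List.enumerate R ((0 : Int) + (T.length : Int) + (W.length : Int))).flatMap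
      (fun it => if it.1 < (S.length : Int) + sp ∧ sp ≤ it.1 then
        [it.2, (PySem.List.pyGet? S (it.1 - sp)).getD ""] else [it.2]) = R := by
    rw [pv_flatMap_congr (g := fun it => [it.2]) ?_, pv_flatMap_snd,
      PySem.List.map_snd_enumerate]
    intro x hx
    rcases (PySem.List.mem_enumerate_iff _ _ _).1 hx with ⟨k, hk, rfl⟩
    rw [hTlen, hWlen]
    have hc : ¬ ((0 : Int) + (n : Int) + (S.length : Int) + (k : Int) < (S.length : Int) + sp ∧
        sp ≤ (0 : Int) + (n : Int) + (S.length : Int) + (k : Int)) := by omega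
    rw [if_neg hc]
  rw [hTpart, hWpart, hRpart, List.append_assoc]

-- zip truncates at the shorter list: restrict the long side up front
theorem pv_zip_take {α β : Type} : ∀ (l : List α) (s : List β),
    l.zip s = (l.take s.length).zip s := by
  intro l
  induction l with
  | nil => intro s; simp
  | cons x xs ih =>
    intro s
    cases s with
    | nil => simp
    | cons y ys => simp [ih ys]

-- a cons-accumulating fold over a reversed list is a map
theorem pv_rev_foldl {α β : Type} (l : List α) (f : α → β) :
    l.reverse.foldl (fun res k => f k :: res) [] = l.map f := by
  rw [List.foldl_reverse]
  induction l with
  | nil => rfl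
  | cons x xs ih => simp [ih]

-- B's three-piece sentence equals A's inner loop at the same start position
theorem pv_sentence (L S : List String) (k : Int) (h0 : 0 ≤ k)
    (h1 : k.toNat + S.length ≤ L.length) :
    PySem.List.slice L none (some k)
      ++ ((PySem.List.slice L (some k) none).zip S).flatMap (fun pair => [pair.1, pair.2])
      ++ PySem.List.slice L (some (k + (S.length : Int))) none
    = pvAInner L S k := by
  set n := k.toNat with hn
  have hk : k = ((n : Nat) : Int) := by omega
  have hadd : ((n : Nat) : Int) + (S.length : Int) = (((n + S.length : Nat)) : Int) := by
    push_cast; omega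
  rw [hk, hadd, PySem.List.slice_to_natCast, PySem.List.slice_from_natCast,
    PySem.List.slice_from_natCast, pv_zip_take (L.drop n) S,
    pv_inner L S ((n : Nat) : Int) (by positivity) (by simpa using h1)]
  simp

-- the whole function, for an already-selected long/short pair
theorem pv_main (L S : List String) (hle : S.length ≤ L.length) :
    (PySem.List.pyRange 0
        (if (L.length : Int) - (S.length : Int) = 0 then 1
         else (L.length : Int) - (S.length : Int)) 1).foldl (fun res start_pos =>
      res ++ [(PySem.List.enumerate L 0).foldl (fun sent it =>
        if it.1 < (S.length : Int) + start_pos ∧ start_pos ≤ it.1 then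
          (sent ++ [it.2]) ++ [(PySem.List.pyGet? S (it.1 - start_pos)).getD ""]
        else sent ++ [it.2]) ([] : List String)]) []
    = (PySem.List.pyRange (((max (L.length - S.length) 1 : Nat) : Int) - 1) (-1) (-1)).foldl
        (fun res k =>
          (PySem.List.slice L none (some k)
            ++ ((PySem.List.slice L (some k) none).zip S).flatMap (fun pair => [pair.1, pair.2])
            ++ PySem.List.slice L (some (k + (S.length : Int))) none) :: res) [] := by
  have htA : (if (L.length : Int) - (S.length : Int) = 0 then 1
      else (L.length : Int) - (S.length : Int)) = ((max (L.length - S.length) 1 : Nat) : Int) := by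
    split_ifs with hz <;> (push_cast; omega)
  have hrev : PySem.List.pyRange (((max (L.length - S.length) 1 : Nat) : Int) - 1) (-1) (-1)
      = (PySem.List.pyRange 0 ((max (L.length - S.length) 1 : Nat) : Int) 1).reverse := by
    rw [PySem.List.pyRange_neg_one_eq_reverse]
    norm_num
  rw [PySem.List.foldl_append_singleton_eq_map, List.nil_append, htA, hrev, pv_rev_foldl]
  apply List.map_congr_left
  intro k hk
  rw [PySem.List.mem_pyRange_one] at hk
  obtain ⟨hl, hr⟩ := hk
  have hb : k.toNat + S.length ≤ L.length := by omega
  exact (pv_sentence L S k hl hb).symm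

-- ===== VERDICT (by name: the statement is the Claim_ definition above) =====
theorem interleave_words_spec : Claim_equal_interleave_words := by
  intro sent1 sent2 _
  unfold Spec_interleave_words interleave_words interleave_words_alt
  by_cases h : sent1.length > sent2.length
  · simp only [if_pos h, if_neg (by omega : ¬ sent1.length ≤ sent2.length)]
    exact pv_main sent1 sent2 (le_of_lt h)
  · simp only [if_neg h, if_pos (by omega : sent1.length ≤ sent2.length)]
    exact pv_main sent2 sent1 (by omega)
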